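-- pv_equiv track=rewrite | github.com/ngminhquan/security_system | user_generate/id_generate.py | otp
-- ===== SOURCE A (Python) =====
-- def hex_to_bin(s):
--     trans = {
--         "0": "0000",
--         "1": "0001",
--         "2": "0010",
--         "3": "0011",
--         "4": "0100",
--         "5": "0101",
--         "6": "0110",
--         "7": "0111",
--         "8": "1000",
--         "9": "1001",
--         "A": "1010",
--         "B": "1011",
--         "C": "1100",
--         "D": "1101",
--         "E": "1110",
--         "F": "1111"}
--     binary = ""
--     for i in range(len(s)):
--         binary = binary + trans[s[i]]
--     return binary
--
-- def generate_otp(num):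
--     if (num < 10):
--         ch = chr(num + ord('0'))
--     elif (num < 36):
--         ch = chr(num - 10 + ord('a'))
--     else:
--         ch = chr(num - 36 + ord('A'))
--     return ch
--
-- def otp(image_hex_string):
--     split = []
--     for i in range(0, len(image_hex_string), 10):
--         split.append(int(hex_to_bin(image_hex_string[i:i + 10])) % 62)
--     otp = []
--     for i in split:
--         otp.append(generate_otp(int(i)))
--     return otp
-- ===== SOURCE B (Python) =====
-- # Recursive single-pass rewrite: one fused pass per 10-hex-char chunk (no intermediate
-- # residue list), nibble lookup by slicing one 64-char bit table instead of a dict,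
-- # and the OTP character taken by indexing one base-62 alphabet instead of arithmetic branches.
-- _HEX = "0123456789ABCDEF"
-- _BITS = "0000000100100011010001010110011110001001101010111100110111101111"
-- _ALPHABET = "0123456789abcdefghijklmnopqrstuvwxyzABCDEFGHIJKLMNOPQRSTUVWXYZ"
--
--
-- def otp(image_hex_string):
--     if image_hex_string == "":
--         return []
--     bits = ""
--     for c in image_hex_string[:10]:
--         k = _HEX.index(c)
--         bits = bits + _BITS[4 * k:4 * k + 4]
--     return [_ALPHABET[int(bits) % 62]] + otp(image_hex_string[10:])
-- ===== Notes on version B (the rewrite author's own statement) =====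
-- stated objective: alternative
-- what changed: Replaces A's two sequential loops (build a residue list via an index loop with a dict-driven bit-string builder, then map a 3-branch chr arithmetic) by a single recursive pass that, per 10-char chunk, assembles the bit string by slicing one 64-char nibble table and emits the OTP character by indexing a base-62 alphabet string.
import Mathlib
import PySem

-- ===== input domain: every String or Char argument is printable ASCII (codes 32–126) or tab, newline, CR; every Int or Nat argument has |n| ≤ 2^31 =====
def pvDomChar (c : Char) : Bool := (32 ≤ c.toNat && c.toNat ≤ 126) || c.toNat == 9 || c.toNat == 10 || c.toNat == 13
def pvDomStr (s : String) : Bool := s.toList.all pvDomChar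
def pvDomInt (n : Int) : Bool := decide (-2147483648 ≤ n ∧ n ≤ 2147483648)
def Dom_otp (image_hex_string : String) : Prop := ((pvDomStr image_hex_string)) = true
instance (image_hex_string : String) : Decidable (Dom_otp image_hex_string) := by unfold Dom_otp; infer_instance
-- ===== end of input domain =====

-- ===== PORT A =====
-- One honest line: B replaces A's two index loops, pattern dict and arithmetic branches by a
-- single recursive pass per 10-char chunk with a sliced bit table and an alphabet lookup (alternative decomposition).
-- Python 1-character strings are represented as Char / List Char throughout (exact on this domain).

-- trans = {...} : the hex-digit → 4-bit-pattern dict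
def pvTrans : PySem.Dict Char (List Char) :=
  PySem.Dict.ofList
    [('0', ['0', '0', '0', '0']),
     ('1', ['0', '0', '0', '1']),
     ('2', ['0', '0', '1', '0']),
     ('3', ['0', '0', '1', '1']),
     ('4', ['0', '1', '0', '0']),
     ('5', ['0', '1', '0', '1']),
     ('6', ['0', '1', '1', '0']),
     ('7', ['0', '1', '1', '1']),
     ('8', ['1', '0', '0', '0']),
     ('9', ['1', '0', '0', '1']),
     ('A', ['1', '0', '1', '0']),
     ('B', ['1', '0', '1', '1']),
     ('C', ['1', '1', '0', '0']),
     ('D', ['1', '1', '0', '1']),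
     ('E', ['1', '1', '1', '0']),
     ('F', ['1', '1', '1', '1'])]

-- hex_to_bin: index loop appending trans[s[i]]; s[i] is always in range here, and a missing
-- key is a KeyError in Python (excluded by Pre_), so the getD defaults are never reached inside Pre_.
def hex_to_bin (s : String) : List Char :=
  (PySem.List.pyRange 0 (PySem.Str.len s) 1).foldl
    (fun binary i => binary ++ PySem.Dict.getD pvTrans (PySem.List.pyGetD s.toList i ' ') []) []

-- generate_otp: chr ported by hand as Char.ofNat (exact for the codes 48..122 produced here)
def generate_otp (num : Int) : String :=
  if num < 10 then String.ofList [Char.ofNat (num + 48).toNat]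
  else if num < 36 then String.ofList [Char.ofNat (num - 10 + 97).toNat]
  else String.ofList [Char.ofNat (num - 36 + 65).toNat]

-- otp: first loop builds `split`, second maps generate_otp; int(i) on an int is the identity;
-- int(binary) is PySem.Int.ofChars? (its ValueError is unreachable: every chunk is nonempty inside Pre_).
def otp (image_hex_string : String) : List String :=
  let split : List Int :=
    (PySem.List.pyRange 0 (PySem.Str.len image_hex_string) 10).foldl
      (fun acc i =>
        acc ++ [PySem.Int.mod
          ((PySem.Int.ofChars? (hex_to_bin
              (PySem.Str.slice image_hex_string (some i) (some (i + 10))))).getD 0) 62]) []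
  split.foldl (fun acc i => acc ++ [generate_otp i]) []

-- ===== PORT B =====
-- _HEX, _BITS, _ALPHABET (strings as char lists, exact)
def pvHex : List Char := ['0', '1', '2', '3', '4', '5', '6', '7', '8', '9', 'A', 'B', 'C', 'D', 'E', 'F']
def pvBits : List Char := ['0', '0', '0', '0', '0', '0', '0', '1', '0', '0', '1', '0', '0', '0', '1', '1', '0', '1', '0', '0', '0', '1', '0', '1', '0', '1', '1', '0', '0', '1', '1', '1', '1', '0', '0', '0', '1', '0', '0', '1', '1', '0', '1', '0', '1', '0', '1', '1', '1', '1', '0', '0', '1', '1', '0', '1', '1', '1', '1', '0', '1', '1', '1', '1']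
def pvAlphabet : List Char := ['0', '1', '2', '3', '4', '5', '6', '7', '8', '9', 'a', 'b', 'c', 'd', 'e', 'f', 'g', 'h', 'i', 'j', 'k', 'l', 'm', 'n', 'o', 'p', 'q', 'r', 's', 't', 'u', 'v', 'w', 'x', 'y', 'z', 'A', 'B', 'C', 'D', 'E', 'F', 'G', 'H', 'I', 'J', 'K', 'L', 'M', 'N', 'O', 'P', 'Q', 'R', 'S', 'T', 'U', 'V', 'W', 'X', 'Y', 'Z']

-- the recursion of Source B on the string's characters; _HEX.index(c) is PySem.Chars.find (exact
-- whenever c occurs, i.e. inside Pre_); _ALPHABET[r] with r = ... % 62 is always in range.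
def otpGoB (cs : List Char) : List String :=
  if cs = [] then []
  else
    let bits : List Char :=
      (PySem.List.slice cs none (some 10)).foldl
        (fun b c =>
          let k := PySem.Chars.find pvHex [c]
          b ++ PySem.List.slice pvBits (some (4 * k)) (some (4 * k + 4))) []
    (((PySem.List.pyGet? pvAlphabet
        (PySem.Int.mod ((PySem.Int.ofChars? bits).getD 0) 62)).map
          (fun ch => String.ofList [ch])).getD "")
      :: otpGoB (PySem.List.slice cs (some 10) none)
termination_by cs.length
decreasing_by
  rename_i h
  have hl : cs.length ≠ 0 := fun hh => h (List.eq_nil_of_length_eq_zero hh)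
  simp [PySem.List.slice_some_none, PySem.List.clampIdx]
  omega

def otp_alt (image_hex_string : String) : List String :=
  otpGoB image_hex_string.toList

-- ===== PRECONDITION & SPEC =====
-- Pre_: exactly the strings A returns on — every character an uppercase hex digit
-- (any other character is a KeyError in A's trans lookup).
def Pre_otp (image_hex_string : String) : Prop :=
  image_hex_string.toList.all
    (fun c => ['0','1','2','3','4','5','6','7','8','9','A','B','C','D','E','F'].contains c) = true
instance (image_hex_string : String) : Decidable (Pre_otp image_hex_string) := by
  unfold Pre_otp; infer_instance
def pvWitness_otp : String := "ABCDEF1234567890AA"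
def Spec_otp (image_hex_string : String) (out : List String) : Prop := out = otp_alt image_hex_string
instance (image_hex_string : String) (out : List String) : Decidable (Spec_otp image_hex_string out) := by
  unfold Spec_otp; infer_instance

-- ===== CLAIM (what is proved, stated in full; the proofs are below) =====
def Claim_equal_otp : Prop := ∀ (image_hex_string : String), Dom_otp image_hex_string → Pre_otp image_hex_string → Spec_otp image_hex_string (otp image_hex_string)

-- ===== LEMMAS AND PROOFS =====

-- the hex-digit list, and the two per-character steps the chunk folds use
def pvHexList : List Char := ['0','1','2','3','4','5','6','7','8','9','A','B','C','D','E','F']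

def pvAStep (b : List Char) (c : Char) : List Char := b ++ PySem.Dict.getD pvTrans c []

def pvBStep (b : List Char) (c : Char) : List Char :=
  let k := PySem.Chars.find pvHex [c]
  b ++ PySem.List.slice pvBits (some (4 * k)) (some (4 * k + 4))

-- a fold that pushes one element per step is a map
theorem foldl_push {α β : Type} (g : α → β) (xs : List α) (init : List β) :
    xs.foldl (fun acc x => acc ++ [g x]) init = init ++ xs.map g := by
  induction xs generalizing init with
  | nil => simp
  | cons x t ih => simp [ih]

-- hex_to_bin is the plain fold of pvAStep over the characters
theorem hex_to_bin_eq (t : String) :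
    hex_to_bin t = t.toList.foldl pvAStep [] := by
  unfold hex_to_bin
  have h := PySem.List.foldl_pyRange_zero_pyGetD' (α := Char) (β := List Char) t.toList ' '
      pvAStep []
  simp only [PySem.Str.len_eq]
  simpa [pvAStep] using h

-- per hex digit, dict lookup = table slice
theorem step_eq_of_hex (c : Char) (hc : c ∈ pvHexList) :
    ∀ b : List Char, pvAStep b c = pvBStep b c := by
  fin_cases hc <;> intro b <;> rfl

theorem chunk_fold_eq (t : List Char) (ht : ∀ c ∈ t, c ∈ pvHexList) :
    t.foldl pvAStep [] = t.foldl pvBStep [] := by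
  refine PySem.List.foldl_congr_mem t pvAStep pvBStep [] ?_
  intro acc x hx
  exact step_eq_of_hex x (ht x hx) acc

-- the residue is in [0, 62), and there generate_otp is the alphabet lookup
theorem generate_otp_eq_alphabet (v : Int) :
    generate_otp (PySem.Int.mod v 62) =
      (((PySem.List.pyGet? pvAlphabet (PySem.Int.mod v 62)).map
        (fun ch => String.ofList [ch])).getD "") := by
  rw [PySem.Int.mod_eq_emod_of_pos (by norm_num)]
  have h0 : 0 ≤ v % 62 := Int.emod_nonneg v (by norm_num)
  have h1 : v % 62 < 62 := Int.emod_lt_of_pos v (by norm_num)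
  obtain ⟨n, hn⟩ : ∃ n : Nat, v % 62 = (n : Int) := ⟨(v % 62).toNat, (Int.toNat_of_nonneg h0).symm⟩
  have hn62 : n < 62 := by omega
  rw [hn]
  have key : ∀ m : Nat, m < 62 →
      generate_otp (m : Int) =
        (((PySem.List.pyGet? pvAlphabet (m : Int)).map (fun ch => String.ofList [ch])).getD "") := by
    decide
  exact key n hn62

-- A's per-chunk value (after hex_to_bin_eq)
def pvChunkVal (t : List Char) : Int :=
  PySem.Int.mod ((PySem.Int.ofChars? (t.foldl pvAStep [])).getD 0) 62

-- the range/map form of A equals B's recursion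
theorem main_rec (L : List Char) (hL : ∀ c ∈ L, c ∈ pvHexList) :
    ((PySem.List.pyRange 0 (L.length : Int) 10).map
      (fun i => generate_otp (pvChunkVal (PySem.List.slice L (some i) (some (i + 10))))))
      = otpGoB L := by
  induction hn : L.length using Nat.strong_induction_on generalizing L with
  | _ n ih =>
  subst hn
  by_cases h0 : L = []
  · subst h0
    rw [otpGoB]
    norm_num [PySem.List.pyRange]
  · have hpos : 0 < L.length := List.length_pos_iff.mpr h0
    rw [PySem.List.pyRange_of_pos 0 (L.length : Int) (by norm_num), List.map_map]
    rw [if_pos (by exact_mod_cast hpos)]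
    have hK : (((L.length : Int) - 0 + 10 - 1) / 10).toNat
        = ((((L.length : Int) - 0 + 10 - 1) / 10).toNat - 1) + 1 := by omega
    rw [hK, List.range_succ_eq_map, List.map_cons, List.map_map]
    rw [otpGoB, if_neg h0]
    have hlam : (fun (b : List Char) (c : Char) =>
        let k := PySem.Chars.find pvHex [c]
        b ++ PySem.List.slice pvBits (some (4 * k)) (some (4 * k + 4))) = pvBStep := rfl
    simp only [hlam]
    refine List.cons_eq_cons.mpr ⟨?_, ?_⟩
    · -- head chunk
      have hslice0 : PySem.List.slice L (some ((0:Int) + 10 * ((0:Nat):Int))) (some ((0:Int) + 10 * ((0:Nat):Int) + 10))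
          = PySem.List.slice L none (some 10) := by norm_num
      show generate_otp (pvChunkVal (PySem.List.slice L (some ((0:Int) + 10 * ((0:Nat):Int))) (some ((0:Int) + 10 * ((0:Nat):Int) + 10)))) = _
      rw [hslice0]
      unfold pvChunkVal
      rw [chunk_fold_eq _ (fun c hc => hL c (PySem.List.mem_of_mem_slice _ _ _ hc))]
      exact generate_otp_eq_alphabet _
    · -- tail: apply the induction hypothesis to L.drop 10
      have hdrop : PySem.List.slice L (some 10) none = L.drop 10 := by
        simp [pysem]
      rw [hdrop]
      have hlen : (L.drop 10).length = L.length - 10 := List.length_drop ..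
      have ihd := ih (L.drop 10).length (by omega) (L.drop 10)
        (fun c hc => hL c (List.mem_of_mem_drop hc)) rfl
      rw [← ihd]
      by_cases h10 : L.length ≤ 10
      · -- the tail range is empty on both sides
        have : (((L.length : Int) - 0 + 10 - 1) / 10).toNat - 1 = 0 := by omega
        rw [this]
        have : ((L.drop 10).length : Int) ≤ 0 := by
          rw [hlen]; omega
        simp [PySem.List.pyRange]
        omega
      · rw [PySem.List.pyRange_of_pos 0 ((L.drop 10).length : Int) (by norm_num), List.map_map]
        rw [if_pos (by rw [hlen]; omega)]
        have hKK : (((L.length : Int) - 0 + 10 - 1) / 10).toNat - 1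
            = ((((L.drop 10).length : Int) - 0 + 10 - 1) / 10).toNat := by
          rw [hlen]; omega
        rw [hKK]
        refine List.map_congr_left ?_
        intro k _
        have hsl : PySem.List.slice L (some ((0:Int) + 10 * ((k + 1 : Nat) : Int))) (some ((0:Int) + 10 * ((k + 1 : Nat) : Int) + 10))
            = PySem.List.slice (L.drop 10) (some ((0:Int) + 10 * ((k : Nat) : Int))) (some ((0:Int) + 10 * ((k : Nat) : Int) + 10)) := by
          have e1 : (0:Int) + 10 * ((k + 1 : Nat) : Int) = ((10 * k + 10 : Nat) : Int) := by push_cast; ring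
          have e2 : (0:Int) + 10 * ((k + 1 : Nat) : Int) + 10 = ((10 * k + 20 : Nat) : Int) := by push_cast; ring
          have e3 : (0:Int) + 10 * ((k : Nat) : Int) = ((10 * k : Nat) : Int) := by push_cast; ring
          have e4 : (0:Int) + 10 * ((k : Nat) : Int) + 10 = ((10 * k + 10 : Nat) : Int) := by push_cast; ring
          rw [e2, e1, e4, e3, PySem.List.slice_natCast, PySem.List.slice_natCast, List.drop_drop]
          congr 1
          · omega
          · congr 1; omega
        simp only [Function.comp_apply, Nat.succ_eq_add_one]
        rw [hsl]

-- ===== VERDICT (by name: the statement is the Claim_ definition above) =====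
theorem otp_spec : Claim_equal_otp := by
  intro s _hdom hpre
  unfold Spec_otp otp otp_alt
  rw [foldl_push, foldl_push, List.nil_append, List.nil_append, List.map_map]
  have hpre' : ∀ c ∈ s.toList, c ∈ pvHexList := by
    intro c hc
    have := List.all_eq_true.mp hpre c hc
    simpa [pvHexList, List.contains_iff_mem] using this
  have hlen : PySem.Str.len s = (s.toList.length : Int) := by
    simp [PySem.Str.len_eq]
  rw [hlen, ← main_rec s.toList hpre']
  refine List.map_congr_left ?_
  intro i _
  simp only [Function.comp_apply]
  refine congrArg generate_otp ?_
  unfold pvChunkVal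
  rw [hex_to_bin_eq]
  simp [pysem]
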